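-- pv_equiv track=rewrite | github.com/KashtanRusgib/meroitic-project | generate_paper.py | transliteration_to_meroitic
-- ===== SOURCE A (Python) =====
-- def transliteration_to_meroitic(text: str, signs: dict) -> str:
--     """Convert Latin transliteration to Meroitic Unicode characters."""
--     reverse_map = {v: k for k, v in signs.items() if v != "word_divider"}
--     divider = [k for k, v in signs.items() if v == "word_divider"]
--     div_char = divider[0] if divider else " "
--
--     tokens = text.replace(" : ", " ").split()
--     result_parts = []
--     for token in tokens:
--         # Strip morphological suffixes for character mapping
--         base = token.split("-")[0].lower()
--         meroitic_chars = []
--         i = 0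
--         while i < len(base):
--             matched = False
--             for length in (2, 1):  # try digraphs first
--                 chunk = base[i:i+length]
--                 if chunk in reverse_map:
--                     meroitic_chars.append(reverse_map[chunk])
--                     i += length
--                     matched = True
--                     break
--             if not matched:
--                 # Try with inherent 'a' vowel
--                 if base[i] + "a" in reverse_map:
--                     meroitic_chars.append(reverse_map[base[i] + "a"])
--                     i += 1
--                 else:
--                     i += 1  # skip unmapped characters
--         result_parts.append("".join(meroitic_chars))
--
--     return f" {div_char} ".join(result_parts)
-- ===== SOURCE B (Python) =====
-- import re
--
-- def transliteration_to_meroitic(text: str, signs: dict) -> str: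
--     """Convert Latin transliteration to Meroitic Unicode characters."""
--     reverse_map = {v: k for k, v in signs.items() if v != "word_divider"}
--     div_char = next((k for k, v in signs.items() if v == "word_divider"), " ")
--
--     # One alternation regex: maximal-munch digraph keys first, then a
--     # one-character catch-all; the scan is done by the regex engine.
--     digraphs = [re.escape(k) for k in reverse_map if len(k) == 2]
--     pattern = re.compile("|".join(digraphs + ["."]))
--
--     parts = []
--     for token in text.replace(" : ", " ").split():
--         base = token.split("-")[0].lower()
--         out = []
--         for m in pattern.finditer(base):
--             chunk = m.group(0)
--             if len(chunk) == 2: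
--                 out.append(reverse_map[chunk])
--             elif chunk in reverse_map:
--                 out.append(reverse_map[chunk])
--             else:
--                 out.append(reverse_map.get(chunk + "a", ""))
--         parts.append("".join(out))
--     return f" {div_char} ".join(parts)
-- ===== Notes on version B (the rewrite author's own statement) =====
-- stated objective: idiomatic
-- what changed: The explicit while-loop with per-position try-lengths (2, then 1, then inherent '+a') is replaced by one precompiled alternation regex (escaped digraph keys | '.' catch-all) whose finditer drives the maximal-munch scan; each match is mapped by a direct / '+a' / empty lookup.
import Mathlib
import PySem

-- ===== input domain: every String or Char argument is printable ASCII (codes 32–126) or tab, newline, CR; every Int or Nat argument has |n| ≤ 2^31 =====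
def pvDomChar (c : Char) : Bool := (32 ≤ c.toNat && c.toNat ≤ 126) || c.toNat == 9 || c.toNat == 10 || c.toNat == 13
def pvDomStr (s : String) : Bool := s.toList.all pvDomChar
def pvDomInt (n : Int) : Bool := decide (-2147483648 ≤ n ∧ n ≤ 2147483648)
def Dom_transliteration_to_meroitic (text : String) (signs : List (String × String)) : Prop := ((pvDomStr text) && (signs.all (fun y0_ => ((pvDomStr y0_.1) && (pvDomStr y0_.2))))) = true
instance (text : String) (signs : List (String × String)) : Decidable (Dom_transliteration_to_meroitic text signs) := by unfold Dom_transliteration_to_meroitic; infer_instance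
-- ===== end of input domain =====

-- B replaces A's explicit while/try-lengths scan by a single precompiled
-- alternation regex (digraph keys | '.') driven once over each token (objective: idiomatic).

-- ===== PORT A =====
-- A's inner while loop over the remaining characters of `base`; the
-- `for length in (2, 1)` try is unrolled.  On the last index the length-2
-- slice `base[i:i+2]` is the single remaining character, so the length-2 and
-- length-1 tries test the same key (ported as one lookup of that key).
def pvALoop (rm : PySem.Dict String String) : List Char → List String
  | [] => []
  | [c] =>
    match rm.get? (String.ofList [c]) with
    | some m => [m]
    | none =>
      match rm.get? (String.ofList [c, 'a']) with
      | some m => [m]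
      | none => []
  | c1 :: c2 :: rest =>
    match rm.get? (String.ofList [c1, c2]) with
    | some m => m :: pvALoop rm rest
    | none =>
      match rm.get? (String.ofList [c1]) with
      | some m => m :: pvALoop rm (c2 :: rest)
      | none =>
        match rm.get? (String.ofList [c1, 'a']) with
        | some m => m :: pvALoop rm (c2 :: rest)
        | none => pvALoop rm (c2 :: rest)

def transliteration_to_meroitic (text : String) (signs : List (String × String)) : String :=
  let items := (PySem.Dict.ofList signs).items
  let reverse_map := items.foldl
    (fun d kv => if kv.2 ≠ "word_divider" then d.insert kv.2 kv.1 else d) PySem.Dict.empty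
  let divider := (items.filter (fun kv => kv.2 == "word_divider")).map (·.1)
  let div_char := divider.headD " "
  let tokens := PySem.Str.split₀ (PySem.Str.replace text " : " " ")
  let result_parts := tokens.map (fun token =>
    let base := PySem.Str.lower (((PySem.Str.split? token "-").getD []).headD "")
    PySem.Str.join "" (pvALoop reverse_map base.toList))
  -- f" {div_char} " (string concatenation is exact here: ofList of the char lists)
  PySem.Str.join (String.ofList (' ' :: div_char.toList ++ [' '])) result_parts

-- ===== PORT B =====
-- Source B's compiled alternation regex, as data: the set of digraph keys.  At each
-- position the regex matches a digraph key if one fits, else `.` takes one char.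
def pvBChunks (two : PySem.Set String) : List Char → List String
  | [] => []
  | [c] => [String.ofList [c]]
  | c1 :: c2 :: rest =>
    if PySem.Set.contains two (String.ofList [c1, c2]) then
      String.ofList [c1, c2] :: pvBChunks two rest
    else
      String.ofList [c1] :: pvBChunks two (c2 :: rest)

-- Source B's per-match emission (the loop body over pattern.finditer).
def pvBEmit (rm : PySem.Dict String String) (chunk : String) : String :=
  if PySem.Str.len chunk == 2 then
    rm.getD chunk ""  -- reverse_map[chunk]; a matched digraph alternative is always a key
  else
    match rm.get? chunk with
    | some m => m
    | none => rm.getD (String.ofList (chunk.toList ++ ['a'])) ""  -- reverse_map.get(chunk + "a", "")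

def transliteration_to_meroitic_alt (text : String) (signs : List (String × String)) : String :=
  let items := (PySem.Dict.ofList signs).items
  let reverse_map := items.foldl
    (fun d kv => if kv.2 ≠ "word_divider" then d.insert kv.2 kv.1 else d) PySem.Dict.empty
  let div_char := (((items.filter (fun kv => kv.2 == "word_divider")).map (·.1)).headD " ")
  let two := PySem.Set.ofList (reverse_map.keys.filter (fun k => PySem.Str.len k == 2))
  let tokens := PySem.Str.split₀ (PySem.Str.replace text " : " " ")
  let parts := tokens.map (fun token =>
    let base := PySem.Str.lower (((PySem.Str.split? token "-").getD []).headD "")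
    PySem.Str.join "" ((pvBChunks two base.toList).map (pvBEmit reverse_map)))
  PySem.Str.join (String.ofList (' ' :: div_char.toList ++ [' '])) parts

-- ===== PRECONDITION & SPEC =====
def Spec_transliteration_to_meroitic (text : String) (signs : List (String × String)) (out : String) : Prop := out = transliteration_to_meroitic_alt text signs
instance (text : String) (signs : List (String × String)) (out : String) : Decidable (Spec_transliteration_to_meroitic text signs out) := by unfold Spec_transliteration_to_meroitic; infer_instance

-- ===== CLAIM (what is proved, stated in full; the proofs are below) =====
def Claim_equal_transliteration_to_meroitic : Prop := ∀ (text : String) (signs : List (String × String)), Dom_transliteration_to_meroitic text signs → Spec_transliteration_to_meroitic text signs (transliteration_to_meroitic text signs)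

-- ===== LEMMAS AND PROOFS =====

theorem pv_join_nil_flatten (xss : List (List Char)) :
    PySem.Chars.join [] xss = xss.flatten := by
  induction xss with
  | nil => simp [PySem.Chars.join_nil]
  | cons p rest ih =>
    cases rest with
    | nil => simp [PySem.Chars.join_singleton]
    | cons q r => simp [PySem.Chars.join_cons_cons, ih]

theorem pv_mem_keys_iff (rm : PySem.Dict String String) (k : String) :
    k ∈ rm.keys ↔ (rm.get? k).isSome := by
  rw [← PySem.Dict.contains_iff_mem_keys, PySem.Dict.contains_eq_isSome_get?]

-- the heart: the regex chunking + emission produces exactly the characters A's scan produces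
theorem pv_loop_eq (rm : PySem.Dict String String) (cs : List Char) :
    ((pvBChunks (PySem.Set.ofList (rm.keys.filter (fun k => PySem.Str.len k == 2))) cs).map
        (pvBEmit rm)).flatMap String.toList
      = (pvALoop rm cs).flatMap String.toList := by
  fun_induction pvALoop rm cs with
  | case1 => simp [pvBChunks]
  | case2 c m hm =>
    simp [pvBChunks, pvBEmit, PySem.Str.len, hm]
  | case3 c hn m hm =>
    simp [pvBChunks, pvBEmit, PySem.Str.len, PySem.Dict.getD_eq_get?_getD, hn, hm]
  | case4 c hn hn2 =>
    simp [pvBChunks, pvBEmit, PySem.Str.len, PySem.Dict.getD_eq_get?_getD, hn, hn2]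
  | case5 c1 c2 rest m hm ih =>
    simp [PySem.Str.len] at ih
    simp [pvBChunks, pvBEmit, PySem.Str.len, pv_mem_keys_iff,
      PySem.Dict.getD_eq_get?_getD, hm, ih]
  | case6 c1 c2 rest hn m hm ih =>
    simp [PySem.Str.len] at ih
    simp [pvBChunks, pvBEmit, PySem.Str.len, pv_mem_keys_iff, hn, hm, ih]
  | case7 c1 c2 rest hn hn1 m hm ih =>
    simp [PySem.Str.len] at ih
    simp [pvBChunks, pvBEmit, PySem.Str.len, pv_mem_keys_iff,
      PySem.Dict.getD_eq_get?_getD, hn, hn1, hm, ih]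
  | case8 c1 c2 rest hn hn1 hn2 ih =>
    simp [PySem.Str.len] at ih
    simp [pvBChunks, pvBEmit, PySem.Str.len, pv_mem_keys_iff,
      PySem.Dict.getD_eq_get?_getD, hn, hn1, hn2, ih]

theorem pv_token_eq (rm : PySem.Dict String String) (cs : List Char) :
    PySem.Str.join "" (pvALoop rm cs)
      = PySem.Str.join ""
          ((pvBChunks (PySem.Set.ofList (rm.keys.filter (fun k => PySem.Str.len k == 2))) cs).map
            (pvBEmit rm)) := by
  unfold PySem.Str.join
  congr 1
  rw [show ("" : String).toList = [] from rfl, pv_join_nil_flatten, pv_join_nil_flatten,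
    ← List.flatMap_def, ← List.flatMap_def]
  exact (pv_loop_eq rm cs).symm

-- ===== VERDICT (by name: the statement is the Claim_ definition above) =====
theorem transliteration_to_meroitic_spec : Claim_equal_transliteration_to_meroitic := by
  intro text signs _
  unfold Spec_transliteration_to_meroitic transliteration_to_meroitic transliteration_to_meroitic_alt
  refine congrArg (PySem.Str.join _) ?_
  apply List.map_congr_left
  intro token _
  exact pv_token_eq _ _
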